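-- pv_equiv track=rewrite | github.com/AeroplaneMouse/P5-Code | preprocessors/Generic.py | extractFolderFile
-- ===== SOURCE A (Python) =====
-- def extractFolderFile(csvPath):
--     parts = csvPath.split('/')
--
--     filename = parts[-1:][0]
--     folder = ""
--
--     # Extract folders
--     if len(parts) > 1:
--         for dirName in parts[:-1]:
--             folder += dirName + '/'
--
--     return folder, filename
-- ===== SOURCE B (Python) =====
-- def extractFolderFile(csvPath):
--     if '/' in csvPath:
--         folder, filename = csvPath.rsplit('/', 1)
--         return folder + '/', filename
--     return '', csvPath
-- ===== Notes on version B (the rewrite author's own statement) =====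
-- stated objective: idiomatic
-- what changed: Replaces split-into-all-parts plus a loop that re-concatenates every directory part with a single rsplit at the last separator, computing the folder prefix directly.
import Mathlib
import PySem

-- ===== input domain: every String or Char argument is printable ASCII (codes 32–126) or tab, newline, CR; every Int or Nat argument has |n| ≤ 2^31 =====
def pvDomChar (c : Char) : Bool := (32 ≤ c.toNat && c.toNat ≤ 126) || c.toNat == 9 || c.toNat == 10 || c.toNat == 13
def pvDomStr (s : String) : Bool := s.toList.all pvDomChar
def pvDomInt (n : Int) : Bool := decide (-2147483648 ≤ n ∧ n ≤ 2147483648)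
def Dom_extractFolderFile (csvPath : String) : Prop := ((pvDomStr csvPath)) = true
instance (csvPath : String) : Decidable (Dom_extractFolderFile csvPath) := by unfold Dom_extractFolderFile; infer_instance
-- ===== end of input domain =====

-- B replaces A's split-into-all-parts-and-reconcatenate with a single split at the last '/' (idiomatic, same cost).

-- ===== PORT A =====
def extractFolderFile (csvPath : String) : String × String :=
  let parts : List (List Char) := PySem.Chars.splitOn csvPath.toList ['/']
  -- parts[-1:][0]: split always returns a nonempty list, so the index 0 is in range and the .getD [] default is never taken
  let filename : List Char := (PySem.List.pyGet? (PySem.List.slice parts (some (-1)) none) 0).getD []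
  let folder : List Char :=
    if parts.length > 1 then
      (PySem.List.slice parts none (some (-1))).foldl (fun acc d => acc ++ (d ++ ['/'])) []
    else []
  (String.ofList folder, String.ofList filename)

-- ===== PORT B =====
-- hand port of csvPath.rsplit('/', 1): exact whenever '/' occurs in the input — the only case B calls it
def rsplitSlash : List Char → List Char × List Char
  | [] => ([], [])
  | c :: rest =>
    if '/' ∈ rest then
      let p := rsplitSlash rest
      (c :: p.1, p.2)
    else ([], rest)

def extractFolderFile_alt (csvPath : String) : String × String :=
  if PySem.Str.isIn "/" csvPath then
    let p := rsplitSlash csvPath.toList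
    (String.ofList (p.1 ++ ['/']), String.ofList p.2)
  else ("", csvPath)

-- ===== PRECONDITION & SPEC =====
def Spec_extractFolderFile (csvPath : String) (out : String × String) : Prop := out = extractFolderFile_alt csvPath
instance (csvPath : String) (out : String × String) : Decidable (Spec_extractFolderFile csvPath out) := by unfold Spec_extractFolderFile; infer_instance

-- ===== CLAIM (what is proved, stated in full; the proofs are below) =====
def Claim_equal_extractFolderFile : Prop := ∀ (csvPath : String), Dom_extractFolderFile csvPath → Spec_extractFolderFile csvPath (extractFolderFile csvPath)

-- ===== LEMMAS AND PROOFS =====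

-- structural characterisation of split on the single-char separator '/'
def sp : List Char → List Char × List (List Char)
  | [] => ([], [])
  | c :: rest =>
    let p := sp rest
    if c = '/' then ([], p.1 :: p.2) else (c :: p.1, p.2)

lemma splitOn_go_eq (l : List Char) : ∀ (fuel : Nat) (cur : List Char) (acc : List (List Char)),
    l.length ≤ fuel →
    PySem.Chars.splitOn.go ['/'] fuel l cur acc
      = acc.reverse ++ (cur.reverse ++ (sp l).1) :: (sp l).2 := by
  induction l with
  | nil =>
    intro fuel cur acc _
    cases fuel <;> simp [PySem.Chars.splitOn.go, sp]
  | cons c rest ih =>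
    intro fuel cur acc hfuel
    cases fuel with
    | zero => simp at hfuel
    | succ f =>
      have hpre : (['/'].isPrefixOf (c :: rest)) = (c == '/') := by
        simp [List.isPrefixOf, eq_comm]
      by_cases hc : c = '/'
      · rw [show PySem.Chars.splitOn.go ['/'] (f+1) (c :: rest) cur acc
              = PySem.Chars.splitOn.go ['/'] f rest [] (cur.reverse :: acc) by
            simp [PySem.Chars.splitOn.go, hc]]
        rw [ih f [] (cur.reverse :: acc) (by simpa using hfuel)]
        simp [sp, hc]
      · rw [show PySem.Chars.splitOn.go ['/'] (f+1) (c :: rest) cur acc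
              = PySem.Chars.splitOn.go ['/'] f rest (c :: cur) acc by
            simp [PySem.Chars.splitOn.go, hpre, hc]]
        rw [ih f (c :: cur) acc (by simpa using hfuel)]
        simp [sp, hc]

lemma splitOn_eq_sp (cs : List Char) :
    PySem.Chars.splitOn cs ['/'] = (sp cs).1 :: (sp cs).2 := by
  unfold PySem.Chars.splitOn
  rw [splitOn_go_eq cs (cs.length + 1) [] [] (by omega)]
  simp

lemma sp_no_slash (cs : List Char) (h : '/' ∉ cs) : sp cs = (cs, []) := by
  induction cs with
  | nil => simp [sp]
  | cons c rest ih =>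
    simp only [List.mem_cons, not_or] at h
    simp [sp, Ne.symm h.1, ih h.2]

lemma sp_snd_ne (cs : List Char) (h : '/' ∈ cs) : (sp cs).2 ≠ [] := by
  induction cs with
  | nil => simp at h
  | cons c rest ih =>
    by_cases hc : c = '/'
    · simp [sp, hc]
    · have hr : '/' ∈ rest := by
        rcases List.mem_cons.mp h with h1 | h1
        · exact absurd h1.symm hc
        · exact h1
      simp [sp, hc, ih hr]

-- the last element of a nonempty list, threaded head-first
def lastOf (h : List Char) : List (List Char) → List Char
  | [] => h
  | x :: t => lastOf x t

lemma sliceLast (h : List Char) (t : List (List Char)) :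
    (PySem.List.pyGet? (PySem.List.slice (h :: t) (some (-1)) none) 0).getD [] = lastOf h t := by
  induction t generalizing h with
  | nil =>
    simp [PySem.List.slice_some_none, PySem.List.pyGet?, PySem.List.pyIdx?, lastOf]
  | cons x t ih =>
    have hx := ih x
    simp only [PySem.List.slice_some_none, PySem.List.clampIdx_neg_one, List.length_cons] at hx ⊢
    rw [show t.length + 1 + 1 - 1 = t.length + 1 by omega, List.drop_succ_cons]
    rw [show t.length + 1 - 1 = t.length by omega] at hx
    simpa [lastOf] using hx

lemma main_slash (cs : List Char) (h : '/' ∈ cs) :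
    (((sp cs).1 :: (sp cs).2).dropLast).flatMap (fun d => d ++ ['/']) = (rsplitSlash cs).1 ++ ['/']
    ∧ lastOf (sp cs).1 (sp cs).2 = (rsplitSlash cs).2 := by
  induction cs with
  | nil => simp at h
  | cons c rest ih =>
    by_cases hr : '/' ∈ rest
    · obtain ⟨ih1, ih2⟩ := ih hr
      obtain ⟨y, t, hsp⟩ : ∃ y t, (sp rest).2 = y :: t := by
        cases h' : (sp rest).2 with
        | nil => exact absurd h' (sp_snd_ne rest hr)
        | cons y t => exact ⟨y, t, rfl⟩
      by_cases hc : c = '/'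
      · constructor
        · simp only [sp, hc, ite_true]
          rw [List.dropLast_cons_of_ne_nil (List.cons_ne_nil _ _), List.flatMap_cons, ih1]
          simp [rsplitSlash, hr]
        · simp only [sp, hc, ite_true, lastOf]
          rw [ih2]
          simp [rsplitSlash, hr]
      · constructor
        · simp only [sp, if_neg hc, hsp]
          rw [hsp] at ih1
          rw [List.dropLast_cons_of_ne_nil (List.cons_ne_nil _ _)] at ih1 ⊢
          simp only [List.flatMap_cons, List.append_assoc] at ih1 ⊢
          rw [List.cons_append, ih1]
          simp [rsplitSlash, hr]
        · simp only [sp, if_neg hc, hsp, lastOf]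
          rw [hsp] at ih2
          simp only [lastOf] at ih2
          rw [ih2]
          simp [rsplitSlash, hr]
    · have hc : c = '/' := by
        rcases List.mem_cons.mp h with h1 | h1
        · exact h1.symm
        · exact absurd h1 hr
      constructor
      · simp [sp, hc, sp_no_slash rest hr, rsplitSlash, hr]
      · simp [sp, hc, sp_no_slash rest hr, rsplitSlash, hr, lastOf]

lemma isIn_slash (s : String) : PySem.Str.isIn "/" s = true ↔ '/' ∈ s.toList := by
  rw [show PySem.Str.isIn "/" s = PySem.Chars.isIn "/".toList s.toList by simp]
  rw [PySem.Chars.isIn_iff_infix]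
  exact List.singleton_infix_iff '/' s.toList

-- ===== VERDICT (by name: the statement is the Claim_ definition above) =====
theorem extractFolderFile_spec : Claim_equal_extractFolderFile := by
  intro s _dom
  unfold Spec_extractFolderFile extractFolderFile extractFolderFile_alt
  by_cases hin : '/' ∈ s.toList
  · rw [if_pos ((isIn_slash s).mpr hin)]
    obtain ⟨m1, m2⟩ := main_slash s.toList hin
    obtain ⟨y, t, hsp⟩ : ∃ y t, (sp s.toList).2 = y :: t := by
      cases h' : (sp s.toList).2 with
      | nil => exact absurd h' (sp_snd_ne s.toList hin)
      | cons y t => exact ⟨y, t, rfl⟩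
    have hsl : PySem.List.slice ((sp s.toList).1 :: y :: t) none (some (-1))
        = ((sp s.toList).1 :: y :: t).dropLast := by
      simp [PySem.List.slice, List.dropLast_eq_take]
    simp only [splitOn_eq_sp, hsp, List.length_cons]
    rw [if_pos (by omega), PySem.List.foldl_append_eq_flatMap, sliceLast, hsl, ← hsp, m1, m2]
    simp
  · rw [if_neg (fun hh => hin ((isIn_slash s).mp hh))]
    simp only [splitOn_eq_sp, sp_no_slash s.toList hin]
    rw [if_neg (by simp), sliceLast]
    simp [lastOf]
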